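-- pv_equiv track=rewrite | github.com/KisloTAooAnkit/Python-Programs | Backtracking/RemoveValidParenthesis.py | findNImbalancedBrackets
-- ===== SOURCE A (Python) =====
-- def findNImbalancedBrackets(s):
--     stack = []
--     for i in s:
--         if i == ")":
--             if stack and stack[-1] == "(":
--                 stack.pop()
--             else:
--                 stack.append(i)
--         elif i == "(":
--             stack.append(i)
--     return len(stack)
-- ===== SOURCE B (Python) =====
-- def findNImbalancedBrackets(s):
--     # Closed-form via the running balance: run = opens minus closes over the whole
--     # string, low = min over all prefixes of that balance (capped at 0); the
--     # unmatched-close count is -low and the unmatched-open count is run - low,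
--     # so the answer is run - 2*low.  No stack, no matched/unmatched branching.
--     run = 0
--     low = 0
--     for ch in s:
--         if ch == "(":
--             run += 1
--         elif ch == ")":
--             run -= 1
--             if run < low:
--                 low = run
--     return run - 2 * low
-- ===== Notes on version B (the rewrite author's own statement) =====
-- stated objective: alternative
-- what changed: Instead of simulating a stack (push/pop with a matched-vs-unmatched branch per closing bracket), B computes a closed arithmetic formula from the running bracket balance and its prefix minimum: answer = final_balance - 2*min(0, min prefix balance); a closing bracket always decrements and there is no per-character matching decision or stack.
import Mathlib
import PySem

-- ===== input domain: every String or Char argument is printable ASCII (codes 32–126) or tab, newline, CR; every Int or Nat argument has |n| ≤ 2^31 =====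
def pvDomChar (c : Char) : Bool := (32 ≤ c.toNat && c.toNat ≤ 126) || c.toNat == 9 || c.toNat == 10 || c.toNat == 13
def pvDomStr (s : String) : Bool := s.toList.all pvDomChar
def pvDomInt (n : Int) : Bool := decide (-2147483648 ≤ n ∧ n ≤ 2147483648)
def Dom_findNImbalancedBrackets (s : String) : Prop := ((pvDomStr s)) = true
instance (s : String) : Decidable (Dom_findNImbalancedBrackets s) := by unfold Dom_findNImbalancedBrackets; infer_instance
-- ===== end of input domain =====

-- B replaces A's stack simulation by a closed formula over the running balance and its
-- prefix minimum (run - 2*low); return value only, same O(n) pass, O(1) space.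

-- ===== PORT A =====
-- one loop step of A: push/pop on the stack (Python list, top = last element)
def pvAStep (stack : List Char) (i : Char) : List Char :=
  if i = ')' then
    if stack ≠ [] ∧ stack.getLast? = some '(' then stack.dropLast
    else stack ++ [i]
  else if i = '(' then stack ++ [i]
  else stack

def findNImbalancedBrackets (s : String) : Int :=
  ((s.toList.foldl pvAStep []).length : Int)

-- ===== PORT B =====
-- one loop step of B: update (run, low) = (running balance, its prefix minimum ≤ 0)
def pvBStep (p : Int × Int) (ch : Char) : Int × Int :=
  if ch = '(' then (p.1 + 1, p.2)
  else if ch = ')' then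
    let r := p.1 - 1
    (r, if r < p.2 then r else p.2)
  else p

def findNImbalancedBrackets_alt (s : String) : Int :=
  let p := s.toList.foldl pvBStep (0, 0)
  p.1 - 2 * p.2

-- ===== PRECONDITION & SPEC =====
def Spec_findNImbalancedBrackets (s : String) (out : Int) : Prop := out = findNImbalancedBrackets_alt s
instance (s : String) (out : Int) : Decidable (Spec_findNImbalancedBrackets s out) := by unfold Spec_findNImbalancedBrackets; infer_instance

-- ===== CLAIM (what is proved, stated in full; the proofs are below) =====
def Claim_equal_findNImbalancedBrackets : Prop := ∀ (s : String), Dom_findNImbalancedBrackets s → Spec_findNImbalancedBrackets s (findNImbalancedBrackets s)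

-- ===== LEMMAS AND PROOFS =====

-- Invariant: if A's stack so far is c unmatched closes under o unmatched opens, then B's
-- state is (run, low) = (o - c, -c), and the correspondence is preserved by each step.
theorem pv_inv (l : List Char) (o c : Nat) :
    l.foldl pvAStep (List.replicate c ')' ++ List.replicate o '(') =
      (fun p : Int × Int => List.replicate (-p.2).toNat ')' ++ List.replicate (p.1 - p.2).toNat '(')
        (l.foldl pvBStep ((o : Int) - (c : Int), -(c : Int))) := by
  induction l generalizing o c with
  | nil => simp
  | cons x l ih =>
    simp only [List.foldl_cons]
    by_cases hx : x = '('
    · subst hx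
      have hA : pvAStep (List.replicate c ')' ++ List.replicate o '(') '(' =
          List.replicate c ')' ++ List.replicate (o + 1) '(' := by
        simp [pvAStep, List.replicate_succ' (n := o)]
      have hB : pvBStep ((o : Int) - (c : Int), -(c : Int)) '(' =
          (((o + 1 : Nat) : Int) - (c : Int), -(c : Int)) := by
        simp [pvBStep]; ring
      rw [hA, hB]
      exact ih (o + 1) c
    · by_cases hy : x = ')'
      · subst hy
        cases o with
        | zero =>
          have hA : pvAStep (List.replicate c ')' ++ List.replicate 0 '(') ')' =
              List.replicate (c + 1) ')' ++ List.replicate 0 '(' := by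
            cases c with
            | zero => simp [pvAStep]
            | succ c' =>
              simp [pvAStep, List.getLast?_replicate, List.replicate_succ' (n := c' + 1)]
          have hB : pvBStep (((0 : Nat) : Int) - (c : Int), -(c : Int)) ')' =
              (((0 : Nat) : Int) - ((c + 1 : Nat) : Int), -((c + 1 : Nat) : Int)) := by
            simp only [pvBStep]
            have h1 : ¬ ((')' : Char) = '(') := by decide
            rw [if_neg h1]; rw [if_pos trivial]
            have h2 : ((0 : Nat) : Int) - (c : Int) - 1 < -(c : Int) := by push_cast; omega
            simp only [if_pos h2]
            rw [Prod.mk.injEq]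
            constructor <;> push_cast <;> ring
          rw [hA, hB]
          exact ih 0 (c + 1)
        | succ o' =>
          have hlast : (List.replicate c ')' ++ List.replicate (o' + 1) '(').getLast? = some '(' := by
            simp [List.replicate_succ' (n := o'), ← List.append_assoc]
          have hA : pvAStep (List.replicate c ')' ++ List.replicate (o' + 1) '(') ')' =
              List.replicate c ')' ++ List.replicate o' '(' := by
            simp [pvAStep, List.dropLast_append_of_ne_nil, List.replicate_succ' (n := o')]
          have hB : pvBStep (((o' + 1 : Nat) : Int) - (c : Int), -(c : Int)) ')' =
              ((o' : Int) - (c : Int), -(c : Int)) := by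
            simp only [pvBStep]
            have h1 : ¬ ((')' : Char) = '(') := by decide
            rw [if_neg h1]; rw [if_pos trivial]
            have h2 : ¬ (((o' + 1 : Nat) : Int) - (c : Int) - 1 < -(c : Int)) := by push_cast; omega
            simp only [if_neg h2]
            rw [Prod.mk.injEq]
            exact ⟨by push_cast; ring, rfl⟩
          rw [hA, hB]
          exact ih o' c
      · have hA : pvAStep (List.replicate c ')' ++ List.replicate o '(') x =
            List.replicate c ')' ++ List.replicate o '(' := by
          simp [pvAStep, hx, hy]
        have hB : pvBStep ((o : Int) - (c : Int), -(c : Int)) x =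
            ((o : Int) - (c : Int), -(c : Int)) := by
          simp [pvBStep, hx, hy]
        rw [hA, hB]
        exact ih o c

-- B's state always satisfies low ≤ 0 and low ≤ run.
theorem pv_bounds (l : List Char) (p : Int × Int) (h0 : p.2 ≤ 0) (h1 : p.2 ≤ p.1) :
    (l.foldl pvBStep p).2 ≤ 0 ∧ (l.foldl pvBStep p).2 ≤ (l.foldl pvBStep p).1 := by
  induction l generalizing p with
  | nil => exact ⟨h0, h1⟩
  | cons x l ih =>
    simp only [List.foldl_cons]
    apply ih
    · unfold pvBStep; split_ifs <;> (try dsimp only) <;> omega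
    · unfold pvBStep; split_ifs <;> (try dsimp only) <;> omega

-- ===== VERDICT (by name: the statement is the Claim_ definition above) =====
theorem findNImbalancedBrackets_spec : Claim_equal_findNImbalancedBrackets := by
  intro s _
  unfold Spec_findNImbalancedBrackets findNImbalancedBrackets findNImbalancedBrackets_alt
  have h := pv_inv s.toList 0 0
  have hb := pv_bounds s.toList (0, 0) le_rfl le_rfl
  simp only [Nat.cast_zero, Int.sub_zero, neg_zero, List.replicate_zero,
    List.append_nil] at h
  rw [h]
  obtain ⟨h0, h1⟩ := hb
  simp only [List.length_append, List.length_replicate]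
  push_cast
  omega
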